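-- pv_equiv track=rewrite | github.com/hanaecarrie/cfdna_snv_benchmark | analysis/supporting_reads.py | check_nucleotide_sequence
-- ===== SOURCE A (Python) =====
-- def check_nucleotide_sequence(seq: str, seqtype='ref'):
--     if not seq.upper():
--         return False
--     for s in seq:
--         if seqtype == 'ref':
--             if s not in ['A', 'C', 'G', 'T']:
--                 return False
--         elif seqtype == 'alt':
--             if s not in ['A', 'C', 'G', 'T', 'N']:
--                 return False
--         else:
--             raise ValueError("unknwn type {}, should be 'ref' or 'alt'".format(seqtype))
--     return True
-- ===== SOURCE B (Python) =====
-- def check_nucleotide_sequence(seq: str, seqtype='ref'):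
--     if not seq.upper():
--         return False
--     if seqtype == 'ref':
--         alphabet = 'ACGT'
--     elif seqtype == 'alt':
--         alphabet = 'ACGTN'
--     else:
--         raise ValueError("unknwn type {}, should be 'ref' or 'alt'".format(seqtype))
--     return sum(seq.count(c) for c in alphabet) == len(seq)
-- ===== Notes on version B (the rewrite author's own statement) =====
-- stated objective: alternative
-- what changed: Instead of scanning the sequence character by character with per-iteration branch selection and early returns, B iterates over the allowed ALPHABET: it sums seq.count(c) for each allowed letter and declares the sequence valid iff that total equals len(seq) (correct because the alphabet letters are distinct, so the counts partition exactly the allowed positions).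
import Mathlib
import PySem

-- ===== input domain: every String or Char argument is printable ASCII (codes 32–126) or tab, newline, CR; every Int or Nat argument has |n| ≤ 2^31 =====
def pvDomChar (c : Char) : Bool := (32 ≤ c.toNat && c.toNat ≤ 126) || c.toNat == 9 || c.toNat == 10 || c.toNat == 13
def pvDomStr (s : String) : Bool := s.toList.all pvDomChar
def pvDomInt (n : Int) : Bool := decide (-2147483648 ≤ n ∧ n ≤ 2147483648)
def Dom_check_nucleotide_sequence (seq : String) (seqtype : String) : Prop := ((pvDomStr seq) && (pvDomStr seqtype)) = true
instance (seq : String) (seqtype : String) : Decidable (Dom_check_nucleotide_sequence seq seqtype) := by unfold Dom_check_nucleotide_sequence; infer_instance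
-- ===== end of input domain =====

-- B validates by iterating over the allowed ALPHABET — it sums seq.count(c) for each allowed
-- letter and compares the total with len(seq) — instead of A's per-character scan with early
-- returns (objective: alternative, same asymptotic cost).

-- ===== PORT A =====
-- the 'for s in seq' loop; the 'else: raise ValueError(...)' branch returns false (excluded by Pre_)
def chkA_loop (seqtype : String) : List Char → Bool
  | [] => true
  | s :: rest =>
    if seqtype = "ref" then
      if s ∉ (['A', 'C', 'G', 'T'] : List Char) then false else chkA_loop seqtype rest
    else if seqtype = "alt" then
      if s ∉ (['A', 'C', 'G', 'T', 'N'] : List Char) then false else chkA_loop seqtype rest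
    else false  -- raise ValueError (outside Pre_)

def check_nucleotide_sequence (seq : String) (seqtype : String) : Bool :=
  if PySem.Str.upper seq = "" then false
  else chkA_loop seqtype seq.toList

-- ===== PORT B =====
-- sum(seq.count(c) for c in alphabet) == len(seq); the 'else: raise' branch is outside Pre_
def check_nucleotide_sequence_alt (seq : String) (seqtype : String) : Bool :=
  if PySem.Str.upper seq = "" then false
  else
    let alphabet : List Char :=
      if seqtype = "ref" then "ACGT".toList
      else if seqtype = "alt" then "ACGTN".toList
      else []  -- raise ValueError (outside Pre_)
    (((alphabet.map (fun c => PySem.Str.count seq (String.ofList [c]))).sum : Int) == PySem.Str.len seq)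

-- ===== PRECONDITION & SPEC =====
-- Pre_ excludes exactly the inputs where A raises ValueError: an unknown seqtype with a non-empty seq.
def Pre_check_nucleotide_sequence (seq : String) (seqtype : String) : Prop :=
  seqtype = "ref" ∨ seqtype = "alt" ∨ seq = ""
instance (seq : String) (seqtype : String) : Decidable (Pre_check_nucleotide_sequence seq seqtype) := by unfold Pre_check_nucleotide_sequence; infer_instance

def pvWitness_check_nucleotide_sequence : String × String := ("ACGT", "ref")

def Spec_check_nucleotide_sequence (seq : String) (seqtype : String) (out : Bool) : Prop := out = check_nucleotide_sequence_alt seq seqtype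
instance (seq : String) (seqtype : String) (out : Bool) : Decidable (Spec_check_nucleotide_sequence seq seqtype out) := by unfold Spec_check_nucleotide_sequence; infer_instance

-- ===== CLAIM (what is proved, stated in full; the proofs are below) =====
def Claim_equal_check_nucleotide_sequence : Prop := ∀ (seq : String) (seqtype : String), Dom_check_nucleotide_sequence seq seqtype → Pre_check_nucleotide_sequence seq seqtype → Spec_check_nucleotide_sequence seq seqtype (check_nucleotide_sequence seq seqtype)

-- ===== LEMMAS AND PROOFS =====
-- A's loop is the 'every char allowed' test
theorem chkA_loop_eq_all (t : String) (allowed : List Char)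
    (h : (t = "ref" ∧ allowed = ['A', 'C', 'G', 'T']) ∨ (t = "alt" ∧ allowed = ['A', 'C', 'G', 'T', 'N']))
    (l : List Char) : chkA_loop t l = l.all (· ∈ allowed) := by
  induction l with
  | nil => simp [chkA_loop]
  | cons c rest ih =>
    rcases h with ⟨ht, ha⟩ | ⟨ht, ha⟩ <;> subst ht <;> subst ha <;>
      simp [chkA_loop, ih]

-- Python's str.count with a single-character needle is List.count
theorem count_go_single (c : Char) (l : List Char) : ∀ (fuel acc : Nat),
    l.length ≤ fuel → PySem.Chars.count.go [c] fuel l acc = acc + l.count c := by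
  induction l with
  | nil =>
    intro fuel acc _
    cases fuel <;> simp [PySem.Chars.count.go]
  | cons h t ih =>
    intro fuel acc hf
    cases fuel with
    | zero => simp at hf
    | succ f =>
      rw [PySem.Chars.count.go]
      by_cases hc : c = h
      · subst hc
        have hpf : [c].isPrefixOf (c :: t) = true := by simp [List.isPrefixOf]
        rw [hpf, if_pos rfl, List.length_singleton, List.drop_one, List.tail_cons,
          ih f (acc + 1) (Nat.le_of_succ_le_succ hf)]
        simp
        omega
      · have hpf : ([c].isPrefixOf (h :: t)) = false := by
          simp [List.isPrefixOf]
          exact hc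
        rw [hpf, if_neg (by simp), ih f acc (Nat.le_of_succ_le_succ hf)]
        simp [Ne.symm hc]

theorem count_single (c : Char) (l : List Char) :
    PySem.Chars.count l [c] = l.count c := by
  rw [PySem.Chars.count]
  simp [count_go_single c l l.length 0 le_rfl]

-- counting by one extra (fresh) letter splits the countP
theorem countP_mem_cons (a : Char) (rest : List Char) (ha : a ∉ rest) (l : List Char) :
    l.countP (· ∈ a :: rest) = l.count a + l.countP (· ∈ rest) := by
  induction l with
  | nil => simp
  | cons x xs ih =>
    simp only [List.countP_cons, List.count_cons, ih]
    by_cases hx : x = a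
    · subst hx; simp [ha, List.mem_cons]; omega
    · by_cases hx2 : x ∈ rest <;>
        simp [hx, hx2, List.mem_cons, Ne.symm] <;> omega

-- the per-letter counts over a duplicate-free alphabet partition the allowed positions
theorem sum_counts_eq_countP (l : List Char) : ∀ (allowed : List Char), allowed.Nodup →
    (allowed.map (fun c => l.count c)).sum = l.countP (· ∈ allowed) := by
  intro allowed hnd
  induction allowed with
  | nil => simp
  | cons a rest ih =>
    rw [List.map_cons, List.sum_cons, ih (List.nodup_cons.mp hnd).2,
      countP_mem_cons a rest (List.nodup_cons.mp hnd).1 l]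

theorem sum_counts_eq_length_iff (l allowed : List Char) (hnd : allowed.Nodup) :
    ((allowed.map (fun c => l.count c)).sum == l.length) = l.all (· ∈ allowed) := by
  rw [sum_counts_eq_countP l allowed hnd, Bool.eq_iff_iff, beq_iff_eq, List.all_eq_true]
  constructor
  · intro h x hx
    simpa using List.countP_eq_length.mp h x hx
  · intro h
    exact List.countP_eq_length.mpr (fun x hx => by simpa using h x hx)

-- ===== VERDICT (by name: the statement is the Claim_ definition above) =====
theorem check_nucleotide_sequence_spec : Claim_equal_check_nucleotide_sequence := by
  intro seq seqtype _ hpre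
  unfold Spec_check_nucleotide_sequence check_nucleotide_sequence check_nucleotide_sequence_alt
  by_cases hu : PySem.Str.upper seq = ""
  · simp [hu]
  · simp only [hu, if_false]
    have key : ∀ allowed : List Char, allowed.Nodup →
        ((((allowed.map (fun c => PySem.Str.count seq (String.ofList [c]))).sum : Int) == PySem.Str.len seq))
          = seq.toList.all (· ∈ allowed) := by
      intro allowed hnd
      have hm : allowed.map (fun c => PySem.Str.count seq (String.ofList [c]))
          = allowed.map (fun c => seq.toList.count c) := by
        apply List.map_congr_left
        intro c _
        rw [PySem.Str.count_eq]
        simpa using count_single c seq.toList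
      have hlen : PySem.Str.len seq = (seq.toList.length : Int) := by
        simp [PySem.Str.len]
      rw [hm, hlen, show ((((allowed.map (fun c => seq.toList.count c)).sum : Int) == (seq.toList.length : Int)))
          = ((allowed.map (fun c => seq.toList.count c)).sum == seq.toList.length) from by
            rw [Bool.eq_iff_iff, beq_iff_eq, beq_iff_eq]
            exact_mod_cast Iff.rfl,
        sum_counts_eq_length_iff seq.toList allowed hnd]
    rcases hpre with ht | ht | hs
    · subst ht
      rw [chkA_loop_eq_all "ref" ['A', 'C', 'G', 'T'] (Or.inl ⟨rfl, rfl⟩)]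
      rw [if_pos rfl, key "ACGT".toList (by decide)]
      simp [show ("ACGT".toList : List Char) = ['A', 'C', 'G', 'T'] from by decide]
    · subst ht
      rw [chkA_loop_eq_all "alt" ['A', 'C', 'G', 'T', 'N'] (Or.inr ⟨rfl, rfl⟩)]
      rw [if_neg (by decide : ¬ ("alt" : String) = "ref"), if_pos rfl, key "ACGTN".toList (by decide)]
      simp [show ("ACGTN".toList : List Char) = ['A', 'C', 'G', 'T', 'N'] from by decide]
    · exact absurd (by subst hs; rfl) hu
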